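-- pv_equiv track=rewrite | github.com/SAINISHAL/final | TIMETABLE -FINAL SOFTWARE/excel_exporter.py | _merge_combined_cell_entries
-- ===== SOURCE A (Python) =====
-- def _merge_combined_cell_entries(cells):
--     """Merge same-course entries into one line, e.g. ['MA161 (DSAI)', 'MA161 (ECE)'] -> ['MA161 (DSAI, ECE)']."""
--     from collections import defaultdict
--     by_course = defaultdict(list)
--     for c in cells:
--         s = str(c).strip()
--         if not s:
--             continue
--         if ' (' in s and s.endswith(')'):
--             course = s.split(' (', 1)[0].strip()
--             dept = s.split(' (', 1)[1][:-1].strip()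
--             by_course[course].append(dept)
--         else:
--             by_course[s].append('')
--     out = []
--     for course, depts in sorted(by_course.items()):
--         depts_set = set(d for d in depts if d)
--
--         # Special formatting for department groups
--         if 'CSE-A' in depts_set and 'CSE-B' in depts_set:
--             depts_set.remove('CSE-A')
--             depts_set.remove('CSE-B')
--             depts_set.add('CSE a and b')
--
--         if 'DSAI' in depts_set and 'ECE' in depts_set:
--             depts_set.remove('DSAI')
--             depts_set.remove('ECE')
--             depts_set.add('DSAI and ECE')
--
--         depts_final = sorted(list(depts_set))
--         if depts_final:
--             out.append(f"{course} ({', '.join(depts_final)})")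
--         else:
--             out.append(course)
--     return out
-- ===== SOURCE B (Python) =====
-- def _merge_combined_cell_entries(cells):
--     """Sort-then-scan reimplementation: parse every cell into a (course, dept)
--     pair, sort the pairs by course, and emit one line per consecutive run."""
--     pairs = []
--     for c in cells:
--         s = str(c).strip()
--         if not s:
--             continue
--         i = s.find(' (')
--         if i != -1 and s.endswith(')'):
--             pairs.append((s[:i].strip(), s[i + 2:-1].strip()))
--         else:
--             pairs.append((s, ''))
--     pairs.sort(key=lambda p: p[0])
--     out = []
--     n = len(pairs)
--     i = 0
--     while i < n:
--         course = pairs[i][0]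
--         ds = set()
--         while i < n and pairs[i][0] == course:
--             if pairs[i][1]:
--                 ds.add(pairs[i][1])
--             i += 1
--         if 'CSE-A' in ds and 'CSE-B' in ds:
--             ds = (ds - {'CSE-A', 'CSE-B'}) | {'CSE a and b'}
--         if 'DSAI' in ds and 'ECE' in ds:
--             ds = (ds - {'DSAI', 'ECE'}) | {'DSAI and ECE'}
--         depts = sorted(ds)
--         out.append(course + ' (' + ', '.join(depts) + ')' if depts else course)
--     return out
-- ===== Notes on version B (the rewrite author's own statement) =====
-- stated objective: alternative
-- what changed: Replaces A's defaultdict grouping followed by sorting the dict items with: parse each cell via str.find and slicing (instead of split) into a flat (course, dept) pair list, sort the pairs by course, and scan consecutive same-course runs, merging department groups with set difference/union (instead of remove/remove/add).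
import Mathlib
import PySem

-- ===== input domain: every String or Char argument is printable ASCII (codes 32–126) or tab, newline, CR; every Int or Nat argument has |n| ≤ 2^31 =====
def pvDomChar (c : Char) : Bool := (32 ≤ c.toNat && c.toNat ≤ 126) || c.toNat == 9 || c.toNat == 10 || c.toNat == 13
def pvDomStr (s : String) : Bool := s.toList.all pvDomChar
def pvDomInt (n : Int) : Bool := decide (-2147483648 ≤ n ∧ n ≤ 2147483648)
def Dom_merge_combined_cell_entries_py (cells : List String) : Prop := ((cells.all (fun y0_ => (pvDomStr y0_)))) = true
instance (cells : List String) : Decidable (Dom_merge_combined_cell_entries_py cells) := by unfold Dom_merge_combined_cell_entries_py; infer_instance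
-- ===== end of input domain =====

-- B replaces A's defaultdict grouping + sorted(dict.items()) by: parse each cell with
-- str.find + slicing into a flat (course, dept) pair list, sort it by course, and scan
-- consecutive same-course runs, merging departments with set algebra (objective: alternative).


-- ===== PORT A =====
-- A's inline cell handling (strip; skip empty; the ' ('/')' test; split(' (', 1) with
-- [0].strip() / [1][:-1].strip()), extracted as a helper for the fold below.
def pvParseCell (c : String) : Option (String × String) :=
  let s := PySem.Str.strip c
  if s = "" then none
  else if PySem.Str.isIn " (" s && PySem.Str.endswith s ")" then
    let parts := (PySem.Str.splitMax? s " (" 1).getD []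
    some (PySem.Str.strip (PySem.List.pyGetD parts 0 ""),
          PySem.Str.strip (PySem.Str.slice (PySem.List.pyGetD parts 1 "") none (some (-1))))
  else some (s, "")

-- body of A's output loop: set of non-empty depts, remove/remove/add merges,
-- sorted + ', '.join formatting.
def pvFormatGroup (course : String) (depts : List String) : String :=
  let s0 : PySem.Set String := PySem.Set.ofList (depts.filter (fun d => decide (d ≠ "")))
  let s1 := if "CSE-A" ∈ s0 ∧ "CSE-B" ∈ s0 then
      PySem.Set.add (PySem.Set.discard (PySem.Set.discard s0 "CSE-A") "CSE-B") "CSE a and b"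
    else s0
  let s2 := if "DSAI" ∈ s1 ∧ "ECE" ∈ s1 then
      PySem.Set.add (PySem.Set.discard (PySem.Set.discard s1 "DSAI") "ECE") "DSAI and ECE"
    else s1
  let fin := PySem.List.sorted s2 (fun x => x)
  if fin = [] then course
  else PySem.Str.join "" [course, " (", PySem.Str.join ", " fin, ")"]

-- A: build the defaultdict(list) keyed by course, then loop over sorted(by_course.items()).
-- (sorted(by_course.items()) compares (course, depts) tuples; dict keys are distinct,
--  so ordering by the course component alone is exact.)
def merge_combined_cell_entries_py (cells : List String) : List String :=
  let d := cells.foldl (fun d c =>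
      match pvParseCell c with
      | none => d
      | some p => d.modify p.1 [] (fun l => l ++ [p.2])) PySem.Dict.empty
  (PySem.List.sorted d.items (fun p => p.1)).foldl
    (fun out p => out ++ [pvFormatGroup p.1 p.2]) []

-- ===== PORT B =====
-- B parses a cell with s.find(' (') and slices s[:i] / s[i+2:-1] instead of split.
def pvAltParse (c : String) : Option (String × String) :=
  let s := PySem.Str.strip c
  if s = "" then none
  else
    let i := PySem.Str.find s " ("
    if i ≠ -1 ∧ PySem.Str.endswith s ")" = true then
      some (PySem.Str.strip (PySem.Str.slice s none (some i)),
            PySem.Str.strip (PySem.Str.slice s (some (i + 2)) (some (-1))))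
    else some (s, "")

-- body of B's outer while loop after the run's dept set ds is collected:
-- set-difference/union merges, then sorted + join rendering.
def pvAltLine (course : String) (ds : PySem.Set String) : String :=
  let d1 := if "CSE-A" ∈ ds ∧ "CSE-B" ∈ ds then
      PySem.Set.union (PySem.Set.diff ds ["CSE-A", "CSE-B"]) ["CSE a and b"] else ds
  let d2 := if "DSAI" ∈ d1 ∧ "ECE" ∈ d1 then
      PySem.Set.union (PySem.Set.diff d1 ["DSAI", "ECE"]) ["DSAI and ECE"] else d1
  let depts := PySem.List.sorted d2 (fun x => x)
  if depts = [] then course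
  else PySem.Str.join "" [course, " (", PySem.Str.join ", " depts, ")"]

-- B's outer while loop over the sorted pair list: the inner while collecting the run's
-- non-empty depts into the set ds is the takeWhile + filter + Set.ofList; advancing i
-- past the run is the dropWhile.
def pvAltRuns : List (String × String) → List String
  | [] => []
  | (k, v) :: rest =>
    pvAltLine k (PySem.Set.ofList
        ((v :: (rest.takeWhile (fun q => q.1 == k)).map (fun q => q.2)).filter
          (fun d => decide (d ≠ ""))))
      :: pvAltRuns (rest.dropWhile (fun q => q.1 == k))
termination_by s => s.length
decreasing_by
  have := List.length_dropWhile_le (fun q => q.1 == k) rest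
  simp only [List.length_cons]; omega

def merge_combined_cell_entries_py_alt (cells : List String) : List String :=
  pvAltRuns (PySem.List.sorted (cells.filterMap pvAltParse) (fun p => p.1))

-- ===== PRECONDITION & SPEC =====
def Spec_merge_combined_cell_entries_py (cells : List String) (out : List String) : Prop := out = merge_combined_cell_entries_py_alt cells
instance (cells : List String) (out : List String) : Decidable (Spec_merge_combined_cell_entries_py cells out) := by unfold Spec_merge_combined_cell_entries_py; infer_instance

-- ===== CLAIM (what is proved, stated in full; the proofs are below) =====
def Claim_equal_merge_combined_cell_entries_py : Prop := ∀ (cells : List String), Dom_merge_combined_cell_entries_py cells → Spec_merge_combined_cell_entries_py cells (merge_combined_cell_entries_py cells)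

-- ===== LEMMAS AND PROOFS =====

-- ---- characterising Chars.find ----
theorem pv_find_eq (s sep : List Char) (k : Nat) (h1 : sep <+: s.drop k)
    (h2 : ∀ i < k, ¬ sep <+: s.drop i) : PySem.Chars.find s sep = k := by
  have hinf : sep <:+: s := h1.isInfix.trans (List.drop_suffix k s).isInfix
  have h0 : 0 ≤ PySem.Chars.find s sep := (PySem.Chars.find_nonneg_iff _ _).mpr hinf
  obtain ⟨hp, hmin⟩ := PySem.Chars.find_spec h0
  have hj : (PySem.Chars.find s sep).toNat = k := by
    rcases lt_trichotomy (PySem.Chars.find s sep).toNat k with hlt | heq | hgt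
    · exact absurd hp (h2 _ hlt)
    · exact heq
    · exact absurd h1 (hmin k hgt)
  omega

theorem pv_find_prefix (s sep : List Char) (h : sep <+: s) : PySem.Chars.find s sep = 0 :=
  pv_find_eq s sep 0 (by simpa using h) (by intro i hi; omega)

theorem pv_find_cons (c : Char) (rest sep : List Char) (hnp : ¬ sep <+: (c :: rest))
    (hinf : sep <:+: rest) :
    PySem.Chars.find (c :: rest) sep = PySem.Chars.find rest sep + 1 := by
  have h0 : 0 ≤ PySem.Chars.find rest sep := (PySem.Chars.find_nonneg_iff _ _).mpr hinf
  obtain ⟨hp, hmin⟩ := PySem.Chars.find_spec h0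
  have := pv_find_eq (c :: rest) sep ((PySem.Chars.find rest sep).toNat + 1)
    (by simpa using hp)
    (by
      intro i hi
      cases i with
      | zero => simpa using hnp
      | succ i' => simpa using hmin i' (by omega))
  omega

-- ---- characterising s.split(sep, 1) on the first occurrence ----
theorem pv_go_zero (sep : List Char) (fuel : Nat) (l cur : List Char) (acc : List (List Char)) :
    PySem.Chars.splitOnMax.go sep fuel 0 l cur acc = ((cur.reverse ++ l) :: acc).reverse := by
  cases fuel with
  | zero => rw [PySem.Chars.splitOnMax.go]
  | succ n => cases l with
    | nil => rw [PySem.Chars.splitOnMax.go] <;> simp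
    | cons c rest => rw [PySem.Chars.splitOnMax.go] <;> simp

theorem pv_go_one (sep : List Char) (hsep : sep ≠ []) :
    ∀ (fuel : Nat) (l : List Char), l.length < fuel → ∀ (cur : List Char) (acc : List (List Char)),
      PySem.Chars.splitOnMax.go sep fuel 1 l cur acc =
        if sep <:+: l then
          acc.reverse ++ [cur.reverse ++ l.take (PySem.Chars.find l sep).toNat,
                          l.drop ((PySem.Chars.find l sep).toNat + sep.length)]
        else acc.reverse ++ [cur.reverse ++ l] := by
  intro fuel
  induction fuel with
  | zero => intro l hl; omega
  | succ n ih =>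
    intro l hl cur acc
    cases l with
    | nil =>
      rw [PySem.Chars.splitOnMax.go]
      case _ => rw [if_neg (by simpa [List.infix_nil] using hsep)]; simp
      case _ => omega
    | cons c rest =>
      rw [PySem.Chars.splitOnMax.go]
      simp only [if_neg (one_ne_zero)]
      by_cases hpre : sep.isPrefixOf (c :: rest) = true
      · rw [if_pos hpre]
        have hpre' : sep <+: (c :: rest) := List.isPrefixOf_iff_prefix.mp hpre
        rw [pv_go_zero]
        rw [if_pos hpre'.isInfix]
        rw [pv_find_prefix _ _ hpre']
        simp
      · rw [if_neg hpre]
        have hnp : ¬ sep <+: (c :: rest) := fun hh => hpre (List.isPrefixOf_iff_prefix.mpr hh)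
        rw [ih rest (by simpa using hl) (c :: cur) acc]
        by_cases hinf : sep <:+: rest
        · rw [if_pos hinf, if_pos (List.infix_cons_iff.mpr (Or.inr hinf))]
          have hfc := pv_find_cons c rest sep hnp hinf
          have h0 : 0 ≤ PySem.Chars.find rest sep := (PySem.Chars.find_nonneg_iff _ _).mpr hinf
          have htn : (PySem.Chars.find (c :: rest) sep).toNat = (PySem.Chars.find rest sep).toNat + 1 := by omega
          have harr : (PySem.Chars.find rest sep).toNat + 1 + sep.length
              = ((PySem.Chars.find rest sep).toNat + sep.length) + 1 := by omega
          rw [htn, List.take_succ_cons, harr, List.drop_succ_cons]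
          simp
        · rw [if_neg hinf, if_neg (by
            intro hh
            rcases List.infix_cons_iff.mp hh with h1 | h2
            · exact hnp h1
            · exact hinf h2)]
          simp

theorem pv_splitOnMax_one (s sep : List Char) (hsep : sep ≠ []) (h : sep <:+: s) :
    PySem.Chars.splitOnMax s sep 1 =
      [s.take (PySem.Chars.find s sep).toNat,
       s.drop ((PySem.Chars.find s sep).toNat + sep.length)] := by
  unfold PySem.Chars.splitOnMax
  rw [if_neg (by omega)]
  have : (1 : Int).toNat = 1 := rfl
  rw [this, pv_go_one sep hsep (s.length + 1) s (by omega) [] [], if_pos h]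
  simp

-- ---- the two parsers agree ----
theorem pv_slice_mid_neg_one (L : List Char) (j : Nat) (hj : j + 2 ≤ L.length) :
    PySem.List.slice L (some ((j : Int) + 2)) (some (-1)) = (L.drop (j + 2)).dropLast := by
  unfold PySem.List.slice
  rw [show ((j : Int) + 2) = ((j + 2 : Nat) : Int) by push_cast; ring]
  simp only [PySem.List.clampIdx_natCast, PySem.List.clampIdx_neg_one, min_eq_left hj]
  rw [List.dropLast_eq_take, List.length_drop]
  congr 1
  omega

theorem pv_parse_eq (c : String) : pvAltParse c = pvParseCell c := by
  unfold pvAltParse pvParseCell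
  simp only []
  set s := PySem.Str.strip c with hsdef
  by_cases h0 : s = ""
  · simp [h0]
  · rw [if_neg h0, if_neg h0]
    by_cases hin : PySem.Str.isIn " (" s = true
    · by_cases hend : PySem.Str.endswith s ")" = true
      · have hinf : (" (" : String).toList <:+: s.toList := (PySem.Str.isIn_iff_infix _ _).mp hin
        have hfind : PySem.Str.find s " (" ≠ -1 := by
          rw [Ne, PySem.Str.find_eq_neg_one_iff]; exact not_not_intro hinf
        rw [if_pos (⟨hfind, hend⟩ : _ ∧ _), if_pos (by rw [hin, hend]; rfl)]
        have h0f : 0 ≤ PySem.Str.find s " (" :=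
          (PySem.Chars.find_nonneg_iff s.toList (" (" : String).toList).mpr hinf
        set i := PySem.Str.find s " (" with hidef
        set j := i.toNat with hjdef
        have hij : i = (j : Int) := (Int.toNat_of_nonneg h0f).symm
        have hspec := PySem.Chars.find_spec (s := s.toList) (sub := (" (" : String).toList) h0f
        have hjj : (PySem.Chars.find s.toList (" (" : String).toList).toNat = j := rfl
        have hj2 : j + 2 ≤ s.toList.length := by
          have hlen := hspec.1.length_le
          rw [List.length_drop, hjj] at hlen
          have h2' : (" (" : String).toList.length = 2 := by decide
          rw [h2'] at hlen
          omega
        have hsplit : (PySem.Str.splitMax? s " (" 1).getD []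
            = [String.ofList (s.toList.take j), String.ofList (s.toList.drop (j + 2))] := by
          unfold PySem.Str.splitMax? PySem.Chars.splitMax?
          rw [if_neg (by decide)]
          rw [pv_splitOnMax_one s.toList (" (" : String).toList (by decide) hinf]
          have h2' : (" (" : String).toList.length = 2 := by decide
          rw [h2']
          rfl
        rw [hsplit]
        have hget0 : PySem.List.pyGetD
            [String.ofList (s.toList.take j), String.ofList (s.toList.drop (j + 2))] 0 ""
            = String.ofList (s.toList.take j) := PySem.List.pyGetD_zero_cons _ _ _
        have hget1 : PySem.List.pyGetD
            [String.ofList (s.toList.take j), String.ofList (s.toList.drop (j + 2))] 1 ""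
            = String.ofList (s.toList.drop (j + 2)) := by
          rw [show (1 : Int) = ((1 : Nat) : Int) from rfl, PySem.List.pyGetD_natCast]
          rfl
        rw [hget0, hget1]
        have hc1 : PySem.Str.slice s none (some i) = String.ofList (s.toList.take j) := by
          apply String.ext
          rw [PySem.Str.toList_slice]
          rw [PySem.Chars.slice_eq_listSlice]
          rw [PySem.List.slice_to _ h0f]
          rw [String.toList_ofList]
        have hc2 : PySem.Str.slice s (some (i + 2)) (some (-1))
            = PySem.Str.slice (String.ofList (s.toList.drop (j + 2))) none (some (-1)) := by
          apply String.ext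
          rw [PySem.Str.toList_slice, PySem.Str.slice_to_neg_one, String.toList_ofList]
          rw [PySem.Chars.slice_eq_listSlice, hij]
          exact pv_slice_mid_neg_one s.toList j hj2
        rw [hc1, hc2]
      · rw [if_neg (fun hh : _ ∧ _ => hend hh.2),
          if_neg (show ¬((PySem.Str.isIn " (" s && PySem.Str.endswith s ")") = true) by
            intro hh; rw [Bool.and_eq_true] at hh; exact hend hh.2)]
    · have hfind : PySem.Str.find s " (" = -1 := by
        rw [PySem.Str.find_eq_neg_one_iff]
        intro hh
        exact hin ((PySem.Str.isIn_iff_infix _ _).mpr hh)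
      rw [if_neg (fun hh : PySem.Str.find s " (" ≠ -1 ∧ PySem.Str.endswith s ")" = true =>
          hh.1 hfind),
        if_neg (show ¬((PySem.Str.isIn " (" s && PySem.Str.endswith s ")") = true) by
          intro hh; rw [Bool.and_eq_true] at hh; exact hin hh.1)]

-- ---- the two per-group renderers agree on any rearrangement of the depts ----
theorem pv_step_mix (a b c : String) {t s : PySem.Set String}
    (ht : t.Nodup) (hs : s.Nodup) (hmem : ∀ x, x ∈ t ↔ x ∈ s) :
    ((if a ∈ t ∧ b ∈ t then PySem.Set.union (PySem.Set.diff t [a, b]) [c] else t).Nodup)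
    ∧ ((if a ∈ s ∧ b ∈ s then PySem.Set.add (PySem.Set.discard (PySem.Set.discard s a) b) c else s).Nodup)
    ∧ (∀ x, x ∈ (if a ∈ t ∧ b ∈ t then PySem.Set.union (PySem.Set.diff t [a, b]) [c] else t)
        ↔ x ∈ (if a ∈ s ∧ b ∈ s then PySem.Set.add (PySem.Set.discard (PySem.Set.discard s a) b) c else s)) := by
  have hc : (a ∈ t ∧ b ∈ t) ↔ (a ∈ s ∧ b ∈ s) := by rw [hmem, hmem]
  by_cases h : a ∈ t ∧ b ∈ t
  · rw [if_pos h, if_pos (hc.mp h)]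
    refine ⟨PySem.Set.nodup_union _ _ (PySem.Set.nodup_diff _ _ ht),
      PySem.Set.nodup_add _ _ (PySem.Set.nodup_discard _ _ (PySem.Set.nodup_discard _ _ hs)),
      fun x => ?_⟩
    simp [PySem.Set.mem_union, PySem.Set.mem_diff, PySem.Set.mem_add, PySem.Set.mem_discard, hmem]
    tauto
  · rw [if_neg h, if_neg (fun hh => h (hc.mpr hh))]
    exact ⟨ht, hs, hmem⟩

theorem pv_line_eq (course : String) (d1 d2 : List String) (hperm : d2.Perm d1) :
    pvAltLine course (PySem.Set.ofList (d2.filter (fun d => decide (d ≠ ""))))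
      = pvFormatGroup course d1 := by
  unfold pvAltLine pvFormatGroup
  have h0 : ∀ x, x ∈ PySem.Set.ofList (d2.filter (fun d => decide (d ≠ "")))
      ↔ x ∈ PySem.Set.ofList (d1.filter (fun d => decide (d ≠ ""))) := by
    intro x
    rw [PySem.Set.mem_ofList, PySem.Set.mem_ofList]
    exact (hperm.filter _).mem_iff
  have h1 := pv_step_mix "CSE-A" "CSE-B" "CSE a and b"
    (PySem.Set.nodup_ofList _) (PySem.Set.nodup_ofList _) h0
  have h2 := pv_step_mix "DSAI" "ECE" "DSAI and ECE" h1.1 h1.2.1 h1.2.2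
  have hfin : PySem.List.sorted _ (fun x => x) = PySem.List.sorted _ (fun x => x) :=
    (PySem.List.sorted_id_eq_sorted_id_iff_perm _ _).mpr
      ((List.perm_ext_iff_of_nodup h2.1 h2.2.1).mpr h2.2.2)
  simp only [hfin]

-- ---- A's pipeline: skip-None fold = fold over filterMap ----
theorem pv_foldl_parse (l : List String) (init : PySem.Dict String (List String)) :
    l.foldl (fun d c =>
        match pvParseCell c with
        | none => d
        | some p => d.modify p.1 [] (fun l => l ++ [p.2])) init
      = (l.filterMap pvParseCell).foldl (fun d p => d.modify p.1 [] (fun l => l ++ [p.2])) init := by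
  induction l generalizing init with
  | nil => rfl
  | cons c l ih =>
    simp only [List.foldl_cons, List.filterMap_cons]
    cases pvParseCell c <;> simp [ih]

-- ---- the grouping dict's items, characterised ----
theorem pv_dict_items (pairs : List (String × String)) :
    (pairs.foldl (fun d p => d.modify p.1 [] (fun l => l ++ [p.2])) PySem.Dict.empty).items
      = (PySem.Set.ofList (pairs.map (fun p => p.1))).map
          (fun k => (k, (pairs.filter (fun p => p.1 == k)).map (fun p => p.2))) := by
  have hk : (pairs.foldl (fun d p => d.modify p.1 [] (fun l => l ++ [p.2])) PySem.Dict.empty).keys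
      = PySem.Set.ofList (pairs.map (fun p => p.1)) := by
    have := PySem.Dict.keys_foldl_modify_key pairs (fun p => p.1) ([] : List String)
      (fun _ p => (fun l => l ++ [p.2])) PySem.Dict.empty
    simpa [PySem.Dict.keys_empty, PySem.Set.update_empty] using this
  have hnd : (pairs.foldl (fun d p => d.modify p.1 [] (fun l => l ++ [p.2])) PySem.Dict.empty).keys.Nodup := by
    rw [hk]; exact PySem.Set.nodup_ofList _
  rw [PySem.Dict.items_eq_map_keys _ hnd ([] : List String), hk]
  refine List.map_congr_left (fun k hkmem => ?_)
  have := PySem.Dict.getD_foldl_modify_append pairs PySem.Dict.empty k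
  simp [PySem.Dict.getD_empty] at this
  simp [this]

-- ---- sorting the items by first component = mapping over the sorted key set ----
theorem pv_sorted_items (pairs : List (String × String)) :
    PySem.List.sorted
        ((PySem.Set.ofList (pairs.map (fun p => p.1))).map
          (fun k => (k, (pairs.filter (fun p => p.1 == k)).map (fun p => p.2))))
        (fun p => p.1)
      = (PySem.List.sorted (PySem.Set.ofList (pairs.map (fun p => p.1))) (fun k => k)).map
          (fun k => (k, (pairs.filter (fun p => p.1 == k)).map (fun p => p.2))) := by
  apply PySem.List.sorted_eq_of_perm_of_pairwise_lt
  · exact ((PySem.List.sorted_perm _ _ _).map _)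
  · have h := PySem.List.sorted_ofList_pairwise_lt (pairs.map (fun p => p.1))
    exact (List.pairwise_map).mpr (h.imp (fun hlt => hlt))

-- ---- ofList is a sublist of its argument ----
theorem pv_ofList_sublist (l : List String) : (PySem.Set.ofList l).Sublist l := by
  induction l with
  | nil => exact List.Sublist.refl _
  | cons x xs ih =>
    rw [PySem.Set.ofList_cons]
    exact List.Sublist.cons₂ x (List.Sublist.trans (List.filter_sublist) ih)

theorem pv_discard_ofList_append (k : String) (t m : List String) (ht : ∀ a ∈ t, a = k) :
    PySem.Set.discard (PySem.Set.ofList (t ++ m)) k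
      = PySem.Set.discard (PySem.Set.ofList m) k := by
  induction t with
  | nil => rfl
  | cons a t' ih =>
    have ha : a = k := ht a (by simp)
    subst ha
    rw [List.cons_append, PySem.Set.ofList_cons]
    show PySem.Set.discard (a :: PySem.Set.discard (PySem.Set.ofList (t' ++ m)) a) a = _
    rw [show ∀ (X : List String), PySem.Set.discard (a :: X) a = PySem.Set.discard X a from
      fun X => by simp [PySem.Set.discard]]
    rw [show ∀ (X : List String), PySem.Set.discard (PySem.Set.discard X a) a = PySem.Set.discard X a from
      fun X => by simp [PySem.Set.discard, List.filter_filter]]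
    exact ih (fun b hb => ht b (by simp [hb]))

theorem pv_dropWhile_head_false {α : Type} (p : α → Bool) (l : List α) (q0 : α) (r' : List α)
    (h : l.dropWhile p = q0 :: r') : p q0 = false := by
  induction l with
  | nil => simp at h
  | cons a l ih =>
    rw [List.dropWhile_cons] at h
    by_cases hp : p a = true
    · rw [if_pos hp] at h; exact ih h
    · rw [if_neg hp] at h; cases h; simpa using hp

-- ---- B's run scan over a sorted pair list = a map over the first occurrences of the keys ----
theorem pv_runs_eq (s : List (String × String)) :
    s.Pairwise (fun a b => a.1 ≤ b.1) →
    pvAltRuns s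
      = (PySem.Set.ofList (s.map (fun p => p.1))).map
          (fun k => pvAltLine k (PySem.Set.ofList
            (((s.filter (fun p => p.1 == k)).map (fun p => p.2)).filter (fun d => decide (d ≠ ""))))) := by
  induction s using pvAltRuns.induct with
  | case1 => intro _; simp [pvAltRuns]
  | case2 k v rest ih =>
    intro h
    have hhead : ∀ q ∈ rest, k ≤ q.1 := by
      intro q hq; exact (List.pairwise_cons.mp h).1 q hq
    have hrest : rest.Pairwise (fun a b => a.1 ≤ b.1) := (List.pairwise_cons.mp h).2
    have ht : ∀ q ∈ rest.takeWhile (fun q => q.1 == k), q.1 = k := by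
      intro q hq
      have hb := List.mem_takeWhile_imp hq
      exact eq_of_beq hb
    have hrsub := List.dropWhile_sublist (l := rest) (fun q => q.1 == k)
    have hrpair : (rest.dropWhile (fun q => q.1 == k)).Pairwise (fun a b => a.1 ≤ b.1) :=
      hrest.sublist hrsub
    have hr : ∀ q ∈ rest.dropWhile (fun q => q.1 == k), q.1 ≠ k := by
      cases hcase : rest.dropWhile (fun q => q.1 == k) with
      | nil => intro q hq; simp at hq
      | cons q0 r' =>
        have hq0 : (q0.1 == k) = false := pv_dropWhile_head_false (fun q => q.1 == k) rest q0 r' hcase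
        have hq0ne : q0.1 ≠ k := by simpa using hq0
        have hq0mem : q0 ∈ rest := hrsub.subset (by rw [hcase]; simp)
        have hklt : k < q0.1 := lt_of_le_of_ne (hhead q0 hq0mem) (Ne.symm hq0ne)
        intro q hq
        rcases List.mem_cons.mp hq with rfl | hq'
        · exact hq0ne
        · have : q0.1 ≤ q.1 := by
            rw [hcase] at hrpair
            exact (List.pairwise_cons.mp hrpair).1 q hq'
          exact ne_of_gt (lt_of_lt_of_le hklt this)
    have hsplit : rest.takeWhile (fun q => q.1 == k) ++ rest.dropWhile (fun q => q.1 == k) = rest :=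
      List.takeWhile_append_dropWhile
    have hkeys : PySem.Set.ofList (((k, v) :: rest).map (fun p => p.1))
        = k :: PySem.Set.ofList ((rest.dropWhile (fun q => q.1 == k)).map (fun p => p.1)) := by
      rw [List.map_cons, PySem.Set.ofList_cons]
      congr 1
      have hmap : rest.map (fun p => p.1)
          = (rest.takeWhile (fun q => q.1 == k)).map (fun p => p.1)
            ++ (rest.dropWhile (fun q => q.1 == k)).map (fun p => p.1) := by
        rw [← List.map_append, hsplit]
      rw [hmap, pv_discard_ofList_append k _ _ (by
        intro a ha
        rcases List.mem_map.mp ha with ⟨q, hq, rfl⟩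
        exact ht q hq)]
      apply List.filter_eq_self.mpr
      intro a ha
      rcases List.mem_map.mp ((PySem.Set.mem_ofList _ _).mp ha) with ⟨q, hq, rfl⟩
      simpa using hr q hq
    have hfilter : ((k, v) :: rest).filter (fun p => p.1 == k)
        = (k, v) :: rest.takeWhile (fun q => q.1 == k) := by
      rw [List.filter_cons_of_pos (by simp)]
      congr 1
      conv_lhs => rw [← hsplit]
      rw [List.filter_append,
        List.filter_eq_self.mpr (fun q hq => by simpa using ht q hq),
        List.filter_eq_nil_iff.mpr (fun q hq => by simpa using hr q hq),
        List.append_nil]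
    rw [pvAltRuns, hkeys, List.map_cons, hfilter, List.map_cons]
    congr 1
    rw [ih hrpair]
    apply List.map_congr_left
    intro k' hk'
    have hk'r : k' ∈ (rest.dropWhile (fun q => q.1 == k)).map (fun p => p.1) :=
      (PySem.Set.mem_ofList _ _).mp hk'
    rcases List.mem_map.mp hk'r with ⟨q', hq', rfl⟩
    have hkne : ¬ (k == q'.1) = true := by
      simpa using fun hh => hr q' hq' hh.symm
    have hfilter2 : ((k, v) :: rest).filter (fun p => p.1 == q'.1)
        = (rest.dropWhile (fun q => q.1 == k)).filter (fun p => p.1 == q'.1) := by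
      rw [List.filter_cons_of_neg (by simpa using hkne)]
      conv_lhs => rw [← hsplit]
      rw [List.filter_append, List.filter_eq_nil_iff.mpr (fun q hq => by
        have := ht q hq
        simp only [this]
        simpa using fun hh => hr q' hq' hh.symm), List.nil_append]
    rw [hfilter2]

-- ---- the two key orders coincide ----
theorem pv_keys_eq (pairs : List (String × String)) :
    PySem.List.sorted (PySem.Set.ofList (pairs.map (fun p => p.1))) (fun k => k)
      = PySem.Set.ofList ((PySem.List.sorted pairs (fun p => p.1)).map (fun p => p.1)) := by
  apply PySem.List.sorted_eq_of_perm_of_pairwise_lt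
  · refine (List.perm_ext_iff_of_nodup (PySem.Set.nodup_ofList _) (PySem.Set.nodup_ofList _)).mpr ?_
    intro a
    rw [PySem.Set.mem_ofList, PySem.Set.mem_ofList]
    simp only [List.mem_map]
    constructor
    · rintro ⟨p, hp, rfl⟩
      exact ⟨p, (PySem.List.sorted_perm _ _ _).mem_iff.mp hp, rfl⟩
    · rintro ⟨p, hp, rfl⟩
      exact ⟨p, (PySem.List.sorted_perm _ _ _).mem_iff.mpr hp, rfl⟩
  · have hle : ((PySem.List.sorted pairs (fun p => p.1)).map (fun p => p.1)).Pairwise (· ≤ ·) :=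
      (List.pairwise_map).mpr (PySem.List.sorted_pairwise _ _)
    have hle' := hle.sublist (pv_ofList_sublist _)
    have hne : (PySem.Set.ofList ((PySem.List.sorted pairs (fun p => p.1)).map (fun p => p.1))).Pairwise (· ≠ ·) :=
      PySem.Set.nodup_ofList _
    exact (hle'.and hne).imp (fun h => lt_of_le_of_ne h.1 h.2)

-- ===== VERDICT (by name: the statement is the Claim_ definition above) =====
theorem merge_combined_cell_entries_py_spec : Claim_equal_merge_combined_cell_entries_py := by
  intro cells _
  unfold Spec_merge_combined_cell_entries_py merge_combined_cell_entries_py merge_combined_cell_entries_py_alt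
  simp only []
  have hparse : pvAltParse = pvParseCell := funext pv_parse_eq
  rw [hparse]
  rw [pv_foldl_parse cells PySem.Dict.empty]
  rw [pv_dict_items, pv_sorted_items, PySem.List.foldl_append_singleton_eq_map, List.nil_append,
    List.map_map]
  rw [pv_runs_eq _ (PySem.List.sorted_pairwise _ _), ← pv_keys_eq]
  apply List.map_congr_left
  intro k hk
  simp only [Function.comp]
  exact (pv_line_eq k _ _
    ((((PySem.List.sorted_perm (cells.filterMap pvParseCell) (fun p => p.1) false).filter _).map _))).symm
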